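-- pv_equiv track=rewrite | github.com/haolunc/ARC-RL | reference_solutions/solutions/ded97339.py | transform
-- ===== SOURCE A (Python) =====
-- def transform(grid):
--
--     h = len(grid)
--     w = len(grid[0]) if h > 0 else 0
--
--     out = [row[:] for row in grid]
--
--     positions = [(r, c) for r in range(h) for c in range(w) if grid[r][c] == 8]
--
--     from collections import defaultdict
--     rows = defaultdict(list)
--     cols = defaultdict(list)
--
--     for r, c in positions:
--         rows[r].append(c)
--         cols[c].append(r)
--
--     for r, cs in rows.items():
--         if len(cs) >= 2:
--             left, right = min(cs), max(cs)
--             for c in range(left, right + 1):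
--                 out[r][c] = 8
--
--     for c, rs in cols.items():
--         if len(rs) >= 2:
--             top, bottom = min(rs), max(rs)
--             for r in range(top, bottom + 1):
--                 out[r][c] = 8
--
--     return out
-- ===== SOURCE B (Python) =====
-- def transform(grid):
--     h = len(grid)
--     w = len(grid[0]) if h > 0 else 0
--     out = [row[:] for row in grid]
--
--     def between(line):
--         # between[i] is True iff line holds an 8 strictly before AND strictly after i
--         before = []
--         seen = False
--         for v in line:
--             before.append(seen)
--             seen = seen or v == 8
--         after = []
--         seen = False
--         for v in reversed(line):
--             after.append(seen)
--             seen = seen or v == 8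
--         after.reverse()
--         return [b and a for b, a in zip(before, after)]
--
--     for r in range(h):
--         flags = between([grid[r][c] for c in range(w)])
--         for c in range(w):
--             if flags[c]:
--                 out[r][c] = 8
--     for c in range(w):
--         flags = between([grid[r][c] for r in range(h)])
--         for r in range(h):
--             if flags[r]:
--                 out[r][c] = 8
--     return out
-- ===== Notes on version B (the rewrite author's own statement) =====
-- stated objective: alternative
-- what changed: B drops A's global 8-position list, defaultdict grouping and min/max range fills; instead it runs prefix/suffix 'seen an 8' boolean sweeps over each row and column and writes 8 into a copy exactly at cells that lie strictly between two 8s (cells holding an 8 are already 8 in the copy). Pre_ excludes ragged grids with a row shorter than the first row, on which A raises IndexError (B raises there too).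
import Mathlib
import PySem

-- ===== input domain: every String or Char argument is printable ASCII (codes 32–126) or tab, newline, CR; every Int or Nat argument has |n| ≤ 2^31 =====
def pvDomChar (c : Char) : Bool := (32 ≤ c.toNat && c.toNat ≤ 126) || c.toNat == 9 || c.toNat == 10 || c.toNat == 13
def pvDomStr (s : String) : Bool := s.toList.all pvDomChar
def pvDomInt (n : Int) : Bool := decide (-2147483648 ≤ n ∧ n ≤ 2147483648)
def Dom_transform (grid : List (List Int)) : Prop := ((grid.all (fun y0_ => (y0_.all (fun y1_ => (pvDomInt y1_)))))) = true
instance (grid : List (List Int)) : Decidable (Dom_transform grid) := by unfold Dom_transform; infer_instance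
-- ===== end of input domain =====

-- B replaces A's 8-position list + defaultdict grouping + min/max range fills by prefix/suffix
-- "seen an 8" boolean sweeps that mark cells lying strictly between two 8s; objective: alternative.

-- ===== PORT A =====
-- out[r][c] = v  (exact when r < len out and c < len out[r]; Pre_ guarantees all writes are in range)
def set2 (out : List (List Int)) (r c : Nat) (v : Int) : List (List Int) :=
  out.set r ((out.getD r []).set c v)

def transform (grid : List (List Int)) : List (List Int) :=
  let h := grid.length
  let w := if 0 < h then (grid.headD []).length else 0
  let out := grid.map (fun row => row)
  let positions := (List.range h).flatMap (fun r =>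
    ((List.range w).filter (fun c => (grid.getD r []).getD c 0 == 8)).map (fun c => (r, c)))
  let rows := positions.foldl (fun d p => d.modify p.1 [] (fun x => x ++ [p.2])) PySem.Dict.empty
  let cols := positions.foldl (fun d p => d.modify p.2 [] (fun x => x ++ [p.1])) PySem.Dict.empty
  let out := rows.items.foldl (fun o p =>
    if 2 ≤ p.2.length then
      let left := (PySem.List.min? p.2 (fun x => x)).getD 0
      let right := (PySem.List.max? p.2 (fun x => x)).getD 0
      (List.range' left (right + 1 - left)).foldl (fun o2 c => set2 o2 p.1 c 8) o
    else o) out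
  let out := cols.items.foldl (fun o p =>
    if 2 ≤ p.2.length then
      let top := (PySem.List.min? p.2 (fun x => x)).getD 0
      let bottom := (PySem.List.max? p.2 (fun x => x)).getD 0
      (List.range' top (bottom + 1 - top)).foldl (fun o2 r => set2 o2 r p.1 8) o
    else o) out
  out

-- ===== PORT B =====
-- between(line): before-pass (flags "an 8 seen strictly before"), after-pass on the reversed
-- list, zipped with &&
def beforeFlags (line : List Int) : List Bool :=
  (line.foldl (fun (p : List Bool × Bool) v => (p.1 ++ [p.2], p.2 || (v == 8))) ([], false)).1

def afterFlags (line : List Int) : List Bool :=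
  ((line.reverse.foldl (fun (p : List Bool × Bool) v => (p.1 ++ [p.2], p.2 || (v == 8))) ([], false)).1).reverse

def betweenFlags (line : List Int) : List Bool :=
  List.zipWith (fun b a => b && a) (beforeFlags line) (afterFlags line)

def transform_alt (grid : List (List Int)) : List (List Int) :=
  let h := grid.length
  let w := if 0 < h then (grid.headD []).length else 0
  let out := grid.map (fun row => row)
  let out := (List.range h).foldl (fun o r =>
    let flags := betweenFlags ((List.range w).map (fun c => (grid.getD r []).getD c 0))
    (List.range w).foldl (fun o2 c => if flags.getD c false then set2 o2 r c 8 else o2) o) out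
  (List.range w).foldl (fun o c =>
    let flags := betweenFlags ((List.range h).map (fun r => (grid.getD r []).getD c 0))
    (List.range h).foldl (fun o2 r => if flags.getD r false then set2 o2 r c 8 else o2) o) out

-- ===== PRECONDITION & SPEC =====
-- Pre_ excludes only ragged grids with a row shorter than the first row: there Python A
-- raises IndexError reading grid[r][c] for c in range(len(grid[0])) (and so does B).
def Pre_transform (grid : List (List Int)) : Prop :=
  ∀ row ∈ grid, (grid.headD []).length ≤ row.length

instance (grid : List (List Int)) : Decidable (Pre_transform grid) := by
  unfold Pre_transform; infer_instance

def pvWitness_transform : List (List Int) := [[8, 0, 8], [0, 0, 0], [8, 0, 8]]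

def Spec_transform (grid : List (List Int)) (out : List (List Int)) : Prop := out = transform_alt grid
instance (grid : List (List Int)) (out : List (List Int)) : Decidable (Spec_transform grid out) := by unfold Spec_transform; infer_instance

-- ===== CLAIM (what is proved, stated in full; the proofs are below) =====
def Claim_equal_transform : Prop := ∀ (grid : List (List Int)), Dom_transform grid → Pre_transform grid → Spec_transform grid (transform grid)

-- ===== LEMMAS AND PROOFS =====

def wstep (o : List (List Int)) (p : Nat × Nat) : List (List Int) := set2 o p.1 p.2 8

theorem min?_eq_head? (l : List Nat) (hl : l.Pairwise (· < ·)) :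
    PySem.List.min? l (fun x => x) = l.head? := by
  cases l with
  | nil => rfl
  | cons a t =>
    have hne : (a :: t) ≠ ([] : List Nat) := by simp
    obtain ⟨m, hm⟩ : ∃ m, PySem.List.min? (a :: t) (fun x => x) = some m := by
      rcases h : PySem.List.min? (a :: t) (fun x => x) with _ | m
      · exact absurd ((PySem.List.min?_eq_none_iff _ _).mp h) hne
      · exact ⟨m, rfl⟩
    have hmem := PySem.List.min?_mem hm
    have hmin := PySem.List.min?_isMin hm
    rw [hm]
    rcases List.mem_cons.mp hmem with h1 | h1
    · simp [h1]
    · have : a < m := (List.pairwise_cons.mp hl).1 m h1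
      have : m ≤ a := hmin a (by simp)
      omega

theorem le_getLast_of_mem (l : List Nat) (hl : l.Pairwise (· < ·)) (hne : l ≠ []) (x : Nat)
    (hx : x ∈ l) : x ≤ l.getLast?.getD 0 := by
  rw [List.pairwise_iff_getElem] at hl
  obtain ⟨i, hi, rfl⟩ := List.getElem_of_mem hx
  rw [List.getLast?_eq_some_getLast hne, Option.getD_some, List.getLast_eq_getElem]
  rcases Nat.lt_or_ge i (l.length - 1) with h' | h'
  · exact le_of_lt (hl i (l.length - 1) hi (by omega) h')
  · have : i = l.length - 1 := by omega
    simp [this]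

theorem max?_eq_getLast? (l : List Nat) (hl : l.Pairwise (· < ·)) :
    PySem.List.max? l (fun x => x) = l.getLast? := by
  cases hn : l.getLast? with
  | none =>
    rw [List.getLast?_eq_none_iff] at hn
    subst hn; rfl
  | some b =>
    have hb : b ∈ l := List.mem_of_getLast? hn
    have hne : l ≠ [] := by rintro rfl; simp at hn
    obtain ⟨m, hm⟩ : ∃ m, PySem.List.max? l (fun x => x) = some m := by
      rcases h : PySem.List.max? l (fun x => x) with _ | m
      · exact absurd ((PySem.List.max?_eq_none_iff _ _).mp h) hne
      · exact ⟨m, rfl⟩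
    have hmem := PySem.List.max?_mem hm
    have hmax := PySem.List.max?_isMax hm
    rw [hm]
    have h1 : m ≤ b := by
      have := le_getLast_of_mem l hl hne m hmem
      rwa [hn, Option.getD_some] at this
    have h2 : b ≤ m := hmax b hb
    exact congrArg some (le_antisymm h1 h2)

theorem head_le_of_mem (l : List Nat) (hl : l.Pairwise (· < ·)) (x : Nat) (hx : x ∈ l) :
    l.head?.getD 0 ≤ x := by
  cases l with
  | nil => simp at hx
  | cons a t =>
    simp only [List.head?_cons, Option.getD_some]
    rcases List.mem_cons.mp hx with rfl | h
    · exact le_refl _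
    · exact le_of_lt ((List.pairwise_cons.mp hl).1 x h)

theorem head_le_getLast (l : List Nat) (hl : l.Pairwise (· < ·)) (hne : l ≠ []) :
    l.head?.getD 0 ≤ l.getLast?.getD 0 := by
  have hh : l.head?.getD 0 ∈ l := by
    cases l with
    | nil => exact absurd rfl hne
    | cons a t => simp
  exact le_getLast_of_mem l hl hne _ hh

theorem two_le_iff_head_lt_getLast (l : List Nat) (hl : l.Pairwise (· < ·)) :
    2 ≤ l.length ↔ l.head?.getD 0 < l.getLast?.getD 0 := by
  match l with
  | [] => simp
  | [a] => simp
  | a :: b :: t =>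
    rw [List.pairwise_iff_getElem] at hl
    constructor
    · intro _
      rw [List.getLast?_eq_some_getLast (l := a :: b :: t) (by simp), List.getLast_eq_getElem]
      simp only [List.head?_cons, Option.getD_some]
      have h0 : (a :: b :: t)[0] = a := rfl
      have := hl 0 ((a :: b :: t).length - 1) (by simp) (by simp) (by simp)
      simpa using this
    · intro _; simp

theorem getLast?_getD_mem (l : List Nat) (hne : l ≠ []) : l.getLast?.getD 0 ∈ l := by
  rw [List.getLast?_eq_some_getLast hne]
  exact List.getLast_mem hne

theorem head?_getD_mem (l : List Nat) (hne : l ≠ []) : l.head?.getD 0 ∈ l := by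
  cases l with
  | nil => exact absurd rfl hne
  | cons a t => simp

theorem getD_set_outer (o : List (List Int)) (r : Nat) (x : List Int) (r' : Nat) :
    (o.set r x).getD r' [] = if r = r' ∧ r < o.length then x else o.getD r' [] := by
  rw [List.getD_eq_getElem?_getD, List.getD_eq_getElem?_getD, List.getElem?_set]
  by_cases h1 : r = r'
  · subst h1
    by_cases h2 : r < o.length
    · simp [h2]
    · simp [h2]
  · simp [h1]

theorem set2_len (o : List (List Int)) (r c : Nat) (v : Int) :
    (set2 o r c v).length = o.length := by simp [set2]

theorem set2_rowlen (o : List (List Int)) (r c : Nat) (v : Int) (r' : Nat) :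
    ((set2 o r c v).getD r' []).length = (o.getD r' []).length := by
  rw [set2, getD_set_outer]
  split_ifs with h
  · rw [List.length_set, h.1]
  · rfl

theorem getD_set_inner (row : List Int) (c : Nat) (v : Int) (c' : Nat) :
    (row.set c v).getD c' 0 = if c = c' ∧ c < row.length then v else row.getD c' 0 := by
  rw [List.getD_eq_getElem?_getD, List.getD_eq_getElem?_getD, List.getElem?_set]
  by_cases h1 : c = c'
  · subst h1
    by_cases h2 : c < row.length
    · simp [h2]
    · simp [h2]
  · simp [h1]

theorem set2_val (o : List (List Int)) (r c : Nat) (v : Int)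
    (hr : r < o.length) (hc : c < (o.getD r []).length) (r' c' : Nat) :
    ((set2 o r c v).getD r' []).getD c' 0 =
      if r = r' ∧ c = c' then v else (o.getD r' []).getD c' 0 := by
  rw [set2, getD_set_outer]
  by_cases h1 : r = r'
  · subst h1
    rw [if_pos ⟨rfl, hr⟩, getD_set_inner]
    by_cases h2 : c = c'
    · subst h2
      rw [if_pos ⟨rfl, hc⟩, if_pos ⟨rfl, rfl⟩]
    · rw [if_neg (fun h => h2 h.1), if_neg (fun h => h2 h.2)]
  · simp [h1]

theorem writes_len (ws : List (Nat × Nat)) (o : List (List Int)) :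
    (ws.foldl wstep o).length = o.length := by
  induction ws generalizing o with
  | nil => rfl
  | cons p t ih => rw [List.foldl_cons, ih, wstep, set2_len]

theorem writes_rowlen (ws : List (Nat × Nat)) (o : List (List Int)) (r : Nat) :
    ((ws.foldl wstep o).getD r []).length = (o.getD r []).length := by
  induction ws generalizing o with
  | nil => rfl
  | cons p t ih => rw [List.foldl_cons, ih, wstep, set2_rowlen]

theorem writes_val (ws : List (Nat × Nat)) (o : List (List Int))
    (hws : ∀ p ∈ ws, p.1 < o.length ∧ p.2 < (o.getD p.1 []).length) (r c : Nat) :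
    ((ws.foldl wstep o).getD r []).getD c 0 =
      if (r, c) ∈ ws then 8 else (o.getD r []).getD c 0 := by
  induction ws generalizing o with
  | nil => simp
  | cons p t ih =>
    obtain ⟨a, b⟩ := p
    have hab := hws (a, b) (by simp)
    rw [List.foldl_cons]
    have hws' : ∀ q ∈ t, q.1 < (wstep o (a, b)).length ∧ q.2 < ((wstep o (a, b)).getD q.1 []).length := by
      intro q hq
      have := hws q (by simp [hq])
      rw [wstep, set2_len, set2_rowlen]
      exact this
    rw [ih _ hws']
    by_cases hmem : (r, c) ∈ t
    · simp [hmem]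
    · have hval := set2_val o a b 8 hab.1 hab.2 r c
      rw [wstep, hval]
      by_cases h1 : a = r ∧ b = c
      · obtain ⟨rfl, rfl⟩ := h1
        simp [hmem]
      · have hne : (r, c) ≠ (a, b) := by
          intro h
          obtain ⟨rfl, rfl⟩ := Prod.mk.injEq .. ▸ h
          exact h1 ⟨rfl, rfl⟩
        have h1' : ¬(a = r ∧ b = c) := h1
        rw [if_neg h1']
        simp [List.mem_cons, hmem, hne]

def gget (grid : List (List Int)) (r c : Nat) : Int := (grid.getD r []).getD c 0
def gW (grid : List (List Int)) : Nat := if 0 < grid.length then (grid.headD []).length else 0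
def eRow (grid : List (List Int)) (r : Nat) : List Nat :=
  (List.range (gW grid)).filter (fun c => gget grid r c == 8)
def eCol (grid : List (List Int)) (c : Nat) : List Nat :=
  (List.range grid.length).filter (fun r => gget grid r c == 8)
def posA (grid : List (List Int)) : List (Nat × Nat) :=
  (List.range grid.length).flatMap (fun r => (eRow grid r).map (fun c => (r, c)))
def rowsDict (grid : List (List Int)) : PySem.Dict Nat (List Nat) :=
  (posA grid).foldl (fun d p => d.modify p.1 [] (fun x => x ++ [p.2])) PySem.Dict.empty
def colsDict (grid : List (List Int)) : PySem.Dict Nat (List Nat) :=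
  (posA grid).foldl (fun d p => d.modify p.2 [] (fun x => x ++ [p.1])) PySem.Dict.empty

theorem flatMap_range_ite {α : Type} (h k : Nat) (v : List α) :
    (List.range h).flatMap (fun r => if r = k then v else []) = if k < h then v else [] := by
  induction h with
  | zero => simp
  | succ n ih =>
    rw [List.range_succ, List.flatMap_append, ih]
    by_cases hk : k < n
    · rw [if_pos hk, if_pos (by omega)]
      simp
      intro h; omega
    · by_cases he : n = k
      · subst he
        simp
      · rw [if_neg hk, if_neg (by omega)]
        simp [he]

theorem filter_fst_posA (grid : List (List Int)) (k : Nat) :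
    ((posA grid).filter (fun p => p.1 == k)).map (fun p => p.2) =
      if k < grid.length then eRow grid k else [] := by
  rw [posA, List.filter_flatMap, List.map_flatMap]
  rw [← flatMap_range_ite grid.length k (eRow grid k)]
  congr 1
  funext r
  rw [List.filter_map]
  have hcomp : ((fun p : Nat × Nat => p.1 == k) ∘ (fun c => (r, c))) = (fun _ => r == k) := rfl
  rw [hcomp]
  by_cases h : r = k
  · subst h
    simp
  · simp [h]

theorem rowsDict_getD (grid : List (List Int)) (k : Nat) :
    (rowsDict grid).getD k [] = if k < grid.length then eRow grid k else [] := by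
  rw [rowsDict, PySem.Dict.getD_foldl_modify_append, PySem.Dict.getD_empty, List.nil_append,
    filter_fst_posA]

theorem rowsDict_keys (grid : List (List Int)) :
    (rowsDict grid).keys = PySem.Set.ofList ((posA grid).map (fun p => p.1)) := by
  rw [rowsDict,
    PySem.Dict.keys_foldl_modify_key (posA grid) (fun p => p.1) []
      (fun _ p => (fun x => x ++ [p.2])) PySem.Dict.empty,
    PySem.Dict.keys_empty, PySem.Set.update_nil_left]

theorem colsDict_keys (grid : List (List Int)) :
    (colsDict grid).keys = PySem.Set.ofList ((posA grid).map (fun p => p.2)) := by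
  rw [colsDict,
    PySem.Dict.keys_foldl_modify_key (posA grid) (fun p => p.2) []
      (fun _ p => (fun x => x ++ [p.1])) PySem.Dict.empty,
    PySem.Dict.keys_empty, PySem.Set.update_nil_left]

theorem rowsDict_keys_nodup (grid : List (List Int)) : (rowsDict grid).keys.Nodup := by
  rw [rowsDict]
  exact PySem.Dict.nodup_keys_foldl_modify_key (posA grid) (fun p => p.1) []
    (fun _ p => (fun x => x ++ [p.2])) PySem.Dict.empty (by simp [PySem.Dict.keys_empty])

theorem colsDict_keys_nodup (grid : List (List Int)) : (colsDict grid).keys.Nodup := by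
  rw [colsDict]
  exact PySem.Dict.nodup_keys_foldl_modify_key (posA grid) (fun p => p.2) []
    (fun _ p => (fun x => x ++ [p.1])) PySem.Dict.empty (by simp [PySem.Dict.keys_empty])

theorem mem_posA (grid : List (List Int)) (r c : Nat) :
    (r, c) ∈ posA grid ↔ r < grid.length ∧ c ∈ eRow grid r := by
  simp [posA, List.mem_flatMap, List.mem_range]

theorem mem_rowsDict_keys (grid : List (List Int)) (k : Nat) :
    k ∈ (rowsDict grid).keys ↔ k < grid.length ∧ eRow grid k ≠ [] := by
  rw [rowsDict_keys, PySem.Set.mem_ofList, List.mem_map]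
  constructor
  · rintro ⟨⟨r, c⟩, hp, rfl⟩
    have := (mem_posA grid r c).mp hp
    exact ⟨this.1, by intro h; rw [h] at this; exact absurd this.2 (List.not_mem_nil)⟩
  · rintro ⟨h1, h2⟩
    obtain ⟨c, hc⟩ := List.exists_mem_of_ne_nil _ h2
    exact ⟨(k, c), (mem_posA grid k c).mpr ⟨h1, hc⟩, rfl⟩

theorem mem_eRow (grid : List (List Int)) (r c : Nat) :
    c ∈ eRow grid r ↔ c < gW grid ∧ gget grid r c = 8 := by
  simp [eRow, List.mem_filter]

theorem mem_eCol (grid : List (List Int)) (r c : Nat) :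
    r ∈ eCol grid c ↔ r < grid.length ∧ gget grid r c = 8 := by
  simp [eCol, List.mem_filter]

theorem mem_colsDict_keys (grid : List (List Int)) (k : Nat) :
    k ∈ (colsDict grid).keys ↔ k < gW grid ∧ eCol grid k ≠ [] := by
  rw [colsDict_keys, PySem.Set.mem_ofList, List.mem_map]
  constructor
  · rintro ⟨⟨r, c⟩, hp, rfl⟩
    have := (mem_posA grid r c).mp hp
    have hc := (mem_eRow grid r c).mp this.2
    refine ⟨hc.1, ?_⟩
    intro h
    have : r ∈ eCol grid c := (mem_eCol grid r c).mpr ⟨this.1, hc.2⟩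
    rw [h] at this
    exact absurd this (List.not_mem_nil)
  · rintro ⟨h1, h2⟩
    obtain ⟨r, hr⟩ := List.exists_mem_of_ne_nil _ h2
    have := (mem_eCol grid r k).mp hr
    exact ⟨(r, k), (mem_posA grid r k).mpr ⟨this.1, (mem_eRow grid r k).mpr ⟨h1, this.2⟩⟩, rfl⟩

theorem eRow_pairwise (grid : List (List Int)) (r : Nat) : (eRow grid r).Pairwise (· < ·) :=
  List.Pairwise.filter _ List.pairwise_lt_range
theorem eCol_pairwise (grid : List (List Int)) (c : Nat) : (eCol grid c).Pairwise (· < ·) :=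
  List.Pairwise.filter _ List.pairwise_lt_range

theorem filter_beq_nodup (l : List Nat) (hl : l.Nodup) (k : Nat) :
    l.filter (fun x => x == k) = if k ∈ l then [k] else [] := by
  induction l with
  | nil => simp
  | cons a t ih =>
    rw [List.nodup_cons] at hl
    by_cases h : a = k
    · subst h
      rw [List.filter_cons_of_pos (by simp)]
      simp [ih hl.2, hl.1]
    · rw [List.filter_cons_of_neg (by simp [h])]
      rw [ih hl.2]
      simp [List.mem_cons, Ne.symm h]

theorem flatMap_ite_singleton (h : Nat) (p : Nat → Bool) :
    (List.range h).flatMap (fun r => if p r then [r] else []) = (List.range h).filter p := by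
  induction h with
  | zero => simp
  | succ n ih =>
    rw [List.range_succ, List.flatMap_append, List.filter_append, ih]
    by_cases hp : p n <;> simp [hp]

theorem colsDict_getD (grid : List (List Int)) (k : Nat) (hk : k < gW grid) :
    (colsDict grid).getD k [] = eCol grid k := by
  have hfold : colsDict grid =
      ((posA grid).map Prod.swap).foldl
        (fun d p => d.modify p.1 [] (fun x => x ++ [p.2])) PySem.Dict.empty := by
    rw [colsDict, List.foldl_map]
    rfl
  rw [hfold, PySem.Dict.getD_foldl_modify_append, PySem.Dict.getD_empty, List.nil_append]
  rw [List.filter_map]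
  have hcomp : ((fun p : Nat × Nat => p.1 == k) ∘ Prod.swap) = (fun p : Nat × Nat => p.2 == k) := rfl
  rw [hcomp, List.map_map]
  have hcomp2 : ((fun p : Nat × Nat => p.2) ∘ Prod.swap) = (fun p : Nat × Nat => p.1) := rfl
  rw [hcomp2, posA, List.filter_flatMap, List.map_flatMap]
  have hper : ∀ r, (List.map (fun p : Nat × Nat => p.1)
      (((eRow grid r).map (fun c => (r, c))).filter (fun p => p.2 == k))) =
      if k ∈ eRow grid r then [r] else [] := by
    intro r
    rw [List.filter_map]
    have hc3 : ((fun p : Nat × Nat => p.2 == k) ∘ (fun c => (r, c))) = (fun c => c == k) := rfl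
    rw [hc3, List.map_map]
    rw [filter_beq_nodup _ ((eRow_pairwise grid r).imp ne_of_lt) k]
    by_cases h : k ∈ eRow grid r <;> simp [h]
  calc (List.range grid.length).flatMap (fun r => List.map (fun p : Nat × Nat => p.1)
          (((eRow grid r).map (fun c => (r, c))).filter (fun p => p.2 == k)))
      = (List.range grid.length).flatMap (fun r => if k ∈ eRow grid r then [r] else []) := by
        apply List.flatMap_congr; intro r _; exact hper r
    _ = (List.range grid.length).filter (fun r => k ∈ eRow grid r) := by
        rw [← flatMap_ite_singleton grid.length (fun r => k ∈ eRow grid r)]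
        simp
    _ = eCol grid k := by
        rw [eCol]
        apply List.filter_congr
        intro r _
        simp [mem_eRow, hk]
        rw [Bool.eq_iff_iff]
        simp [beq_iff_eq]

def wrOf (mk : Nat → Nat → Nat × Nat) (p : Nat × List Nat) : List (Nat × Nat) :=
  if 2 ≤ p.2.length then
    (List.range' ((PySem.List.min? p.2 (fun x => x)).getD 0)
      ((PySem.List.max? p.2 (fun x => x)).getD 0 + 1 - (PySem.List.min? p.2 (fun x => x)).getD 0)).map
      (fun i => mk p.1 i)
  else []
def wsRow (grid : List (List Int)) : List (Nat × Nat) :=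
  (rowsDict grid).items.flatMap (wrOf (fun k i => (k, i)))
def wsCol (grid : List (List Int)) : List (Nat × Nat) :=
  (colsDict grid).items.flatMap (wrOf (fun k i => (i, k)))

theorem mem_wrOf (mk : Nat → Nat → Nat × Nat) (k : Nat) (l : List Nat)
    (hl : l.Pairwise (· < ·)) (q : Nat × Nat) :
    q ∈ wrOf mk (k, l) ↔
      2 ≤ l.length ∧ ∃ i, l.head?.getD 0 ≤ i ∧ i ≤ l.getLast?.getD 0 ∧ q = mk k i := by
  rw [wrOf]
  by_cases h2 : 2 ≤ l.length
  · have hne : l ≠ [] := by intro h; rw [h] at h2; simp at h2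
    rw [if_pos h2]
    simp only [List.mem_map, min?_eq_head? l hl, max?_eq_getLast? l hl]
    have hle : l.head?.getD 0 ≤ l.getLast?.getD 0 := head_le_getLast l hl hne
    constructor
    · rintro ⟨i, hi, rfl⟩
      rw [List.mem_range'_1] at hi
      exact ⟨h2, i, hi.1, by omega, rfl⟩
    · rintro ⟨_, i, hlo, hhi, rfl⟩
      exact ⟨i, List.mem_range'_1.mpr ⟨hlo, by omega⟩, rfl⟩
  · rw [if_neg h2]
    simp [h2]

theorem mem_wsRow (grid : List (List Int)) (r c : Nat) :
    (r, c) ∈ wsRow grid ↔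
      r < grid.length ∧ 2 ≤ (eRow grid r).length ∧
      (eRow grid r).head?.getD 0 ≤ c ∧ c ≤ (eRow grid r).getLast?.getD 0 := by
  rw [wsRow, List.mem_flatMap]
  rw [PySem.Dict.items_eq_map_keys _ (rowsDict_keys_nodup grid) []]
  constructor
  · rintro ⟨p, hp, hq⟩
    rw [List.mem_map] at hp
    obtain ⟨k, hk, rfl⟩ := hp
    rw [mem_rowsDict_keys] at hk
    rw [rowsDict_getD, if_pos hk.1] at hq
    rw [mem_wrOf _ _ _ (eRow_pairwise grid k)] at hq
    obtain ⟨h2, i, hlo, hhi, hqe⟩ := hq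
    obtain ⟨rfl, rfl⟩ := Prod.mk.injEq .. ▸ hqe
    exact ⟨hk.1, h2, hlo, hhi⟩
  · rintro ⟨h1, h2, h3, h4⟩
    have hne : eRow grid r ≠ [] := by
      intro h; rw [h] at h2; simp at h2
    refine ⟨(r, (rowsDict grid).getD r []), ?_, ?_⟩
    · rw [List.mem_map]
      exact ⟨r, (mem_rowsDict_keys grid r).mpr ⟨h1, hne⟩, rfl⟩
    · rw [rowsDict_getD, if_pos h1, mem_wrOf _ _ _ (eRow_pairwise grid r)]
      exact ⟨h2, c, h3, h4, rfl⟩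

theorem mem_wsCol (grid : List (List Int)) (r c : Nat) :
    (r, c) ∈ wsCol grid ↔
      c < gW grid ∧ 2 ≤ (eCol grid c).length ∧
      (eCol grid c).head?.getD 0 ≤ r ∧ r ≤ (eCol grid c).getLast?.getD 0 := by
  rw [wsCol, List.mem_flatMap]
  rw [PySem.Dict.items_eq_map_keys _ (colsDict_keys_nodup grid) []]
  constructor
  · rintro ⟨p, hp, hq⟩
    rw [List.mem_map] at hp
    obtain ⟨k, hk, rfl⟩ := hp
    rw [mem_colsDict_keys] at hk
    rw [colsDict_getD _ _ hk.1] at hq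
    rw [mem_wrOf _ _ _ (eCol_pairwise grid k)] at hq
    obtain ⟨h2, i, hlo, hhi, hqe⟩ := hq
    obtain ⟨rfl, rfl⟩ := Prod.mk.injEq .. ▸ hqe
    exact ⟨hk.1, h2, hlo, hhi⟩
  · rintro ⟨h1, h2, h3, h4⟩
    have hne : eCol grid c ≠ [] := by
      intro h; rw [h] at h2; simp at h2
    refine ⟨(c, (colsDict grid).getD c []), ?_, ?_⟩
    · rw [List.mem_map]
      exact ⟨c, (mem_colsDict_keys grid c).mpr ⟨h1, hne⟩, rfl⟩
    · rw [colsDict_getD _ _ h1, mem_wrOf _ _ _ (eCol_pairwise grid c)]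
      exact ⟨h2, r, h3, h4, rfl⟩

theorem wr_row_fold (o : List (List Int)) (p : Nat × List Nat) :
    (wrOf (fun k i => (k, i)) p).foldl wstep o =
      (if 2 ≤ p.2.length then
        (List.range' ((PySem.List.min? p.2 (fun x => x)).getD 0)
          ((PySem.List.max? p.2 (fun x => x)).getD 0 + 1 - (PySem.List.min? p.2 (fun x => x)).getD 0)).foldl
          (fun o2 c => set2 o2 p.1 c 8) o
      else o) := by
  rw [wrOf]
  split_ifs with h
  · rw [List.foldl_map]
    rfl
  · rfl

theorem wr_col_fold (o : List (List Int)) (p : Nat × List Nat) :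
    (wrOf (fun k i => (i, k)) p).foldl wstep o =
      (if 2 ≤ p.2.length then
        (List.range' ((PySem.List.min? p.2 (fun x => x)).getD 0)
          ((PySem.List.max? p.2 (fun x => x)).getD 0 + 1 - (PySem.List.min? p.2 (fun x => x)).getD 0)).foldl
          (fun o2 r => set2 o2 r p.1 8) o
      else o) := by
  rw [wrOf]
  split_ifs with h
  · rw [List.foldl_map]
    rfl
  · rfl

theorem transform_eq_writes (grid : List (List Int)) :
    transform grid = (wsCol grid).foldl wstep ((wsRow grid).foldl wstep grid) := by
  rw [wsCol, wsRow, List.foldl_flatMap, List.foldl_flatMap]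
  show ((posA grid).foldl (fun d p => d.modify p.2 [] (fun x => x ++ [p.1])) PySem.Dict.empty).items.foldl _
      (((posA grid).foldl (fun d p => d.modify p.1 [] (fun x => x ++ [p.2])) PySem.Dict.empty).items.foldl _ (grid.map (fun row => row))) = _
  rw [List.map_id']
  rw [← colsDict, ← rowsDict]
  have h1 : ∀ (init : List (List Int)),
      (rowsDict grid).items.foldl (fun o p =>
        if 2 ≤ p.2.length then
          (List.range' ((PySem.List.min? p.2 (fun x => x)).getD 0)
            ((PySem.List.max? p.2 (fun x => x)).getD 0 + 1 - (PySem.List.min? p.2 (fun x => x)).getD 0)).foldl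
            (fun o2 c => set2 o2 p.1 c 8) o
        else o) init =
      (rowsDict grid).items.foldl (fun acc x => (wrOf (fun k i => (k, i)) x).foldl wstep acc) init := by
    intro init
    congr 1
    funext o p
    rw [wr_row_fold]
  have h2 : ∀ (init : List (List Int)),
      (colsDict grid).items.foldl (fun o p =>
        if 2 ≤ p.2.length then
          (List.range' ((PySem.List.min? p.2 (fun x => x)).getD 0)
            ((PySem.List.max? p.2 (fun x => x)).getD 0 + 1 - (PySem.List.min? p.2 (fun x => x)).getD 0)).foldl
            (fun o2 r => set2 o2 r p.1 8) o
        else o) init =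
      (colsDict grid).items.foldl (fun acc x => (wrOf (fun k i => (i, k)) x).foldl wstep acc) init := by
    intro init
    congr 1
    funext o p
    rw [wr_col_fold]
  rw [h1, h2]

theorem pre_rowlen (grid : List (List Int)) (h : Pre_transform grid) (r : Nat)
    (hr : r < grid.length) : gW grid ≤ (grid.getD r []).length := by
  have hmem : grid.getD r [] ∈ grid := by
    rw [List.getD_eq_getElem _ _ hr]
    exact List.getElem_mem hr
  have := h _ hmem
  rw [gW, if_pos (by omega)]
  exact this

theorem two_ne_nil (l : List Nat) (h2 : 2 ≤ l.length) : l ≠ [] := by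
  intro h; rw [h] at h2; simp at h2

theorem hrow_ws (grid : List (List Int)) (hpre : Pre_transform grid) :
    ∀ p ∈ wsRow grid, p.1 < grid.length ∧ p.2 < (grid.getD p.1 []).length := by
  rintro ⟨r, c⟩ hp
  rw [mem_wsRow] at hp
  obtain ⟨h1, h2, h3, h4⟩ := hp
  have hmem := getLast?_getD_mem _ (two_ne_nil _ h2)
  have hlast := (mem_eRow grid r _).mp hmem
  have hge := pre_rowlen grid hpre r h1
  refine ⟨h1, ?_⟩
  have hc1 : c < gW grid := lt_of_le_of_lt h4 hlast.1
  show c < (grid.getD r []).length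
  omega

theorem hcol_ws (grid : List (List Int)) (hpre : Pre_transform grid) :
    ∀ p ∈ wsCol grid, p.1 < grid.length ∧ p.2 < (grid.getD p.1 []).length := by
  rintro ⟨r, c⟩ hp
  rw [mem_wsCol] at hp
  obtain ⟨h1, h2, h3, h4⟩ := hp
  have hmem := getLast?_getD_mem _ (two_ne_nil _ h2)
  have hlast := (mem_eCol grid _ c).mp hmem
  have hr : r < grid.length := lt_of_le_of_lt h4 hlast.1
  have hge := pre_rowlen grid hpre r hr
  refine ⟨hr, ?_⟩
  show c < (grid.getD r []).length
  omega

theorem A_len (grid : List (List Int)) : (transform grid).length = grid.length := by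
  rw [transform_eq_writes, writes_len, writes_len]

theorem A_rowlen (grid : List (List Int)) (r : Nat) :
    ((transform grid).getD r []).length = (grid.getD r []).length := by
  rw [transform_eq_writes, writes_rowlen, writes_rowlen]

theorem A_val (grid : List (List Int)) (hpre : Pre_transform grid) (r c : Nat) :
    ((transform grid).getD r []).getD c 0 =
      if (r, c) ∈ wsCol grid ∨ (r, c) ∈ wsRow grid then 8 else gget grid r c := by
  rw [transform_eq_writes]
  have hcol : ∀ p ∈ wsCol grid,
      p.1 < ((wsRow grid).foldl wstep grid).length ∧
      p.2 < (((wsRow grid).foldl wstep grid).getD p.1 []).length := by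
    intro p hp
    rw [writes_len, writes_rowlen]
    exact hcol_ws grid hpre p hp
  rw [writes_val _ _ hcol, writes_val _ _ (hrow_ws grid hpre)]
  by_cases h1 : (r, c) ∈ wsCol grid
  · simp [h1]
  · by_cases h2 : (r, c) ∈ wsRow grid <;> simp [h1, h2, gget]

-- ===== B-side lemmas =====

theorem before_aux (line : List Int) (acc : List Bool) (s : Bool) :
    line.foldl (fun (p : List Bool × Bool) v => (p.1 ++ [p.2], p.2 || (v == 8))) (acc, s) =
      (acc ++ (List.range line.length).map (fun i => s || (line.take i).any (· == 8)),
       s || line.any (· == 8)) := by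
  induction line generalizing acc s with
  | nil => simp
  | cons v t ih =>
    rw [List.foldl_cons]
    dsimp only
    rw [ih]
    simp [List.range_succ_eq_map, List.map_map, Function.comp, Bool.or_assoc, List.append_assoc]

theorem beforeFlags_eq (line : List Int) :
    beforeFlags line = (List.range line.length).map (fun i => (line.take i).any (· == 8)) := by
  rw [beforeFlags, before_aux]
  simp

theorem afterFlags_eq_rev (line : List Int) :
    afterFlags line = (beforeFlags line.reverse).reverse := rfl

theorem zipWith_self_map {α β : Type} (f : α → α → β) (l : List α) :
    List.zipWith f l l = l.map (fun a => f a a) := by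
  induction l with
  | nil => rfl
  | cons a t ih => simp

theorem afterFlags_eq (line : List Int) :
    afterFlags line = (List.range line.length).map (fun i => (line.drop (i + 1)).any (· == 8)) := by
  rw [afterFlags_eq_rev, beforeFlags_eq]
  apply List.ext_getElem
  · simp
  intro i h1 h2
  simp only [List.length_reverse, List.length_map, List.length_range] at h1 h2
  simp only [List.getElem_reverse, List.getElem_map, List.getElem_range, List.length_reverse,
    List.length_map, List.length_range]
  rw [List.take_reverse, List.any_reverse]
  have : line.length - (line.length - 1 - i) = i + 1 := by omega
  rw [this]

theorem betweenFlags_eq (line : List Int) :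
    betweenFlags line = (List.range line.length).map
      (fun i => (line.take i).any (· == 8) && (line.drop (i + 1)).any (· == 8)) := by
  rw [betweenFlags, beforeFlags_eq, afterFlags_eq, List.zipWith_map, zipWith_self_map]

theorem betweenFlags_getD (line : List Int) (c : Nat) (hc : c < line.length) :
    (betweenFlags line).getD c false =
      ((line.take c).any (· == 8) && (line.drop (c + 1)).any (· == 8)) := by
  rw [betweenFlags_eq, List.getD_eq_getElem?_getD, List.getElem?_map, List.getElem?_range hc]
  rfl

def rowLine (grid : List (List Int)) (r : Nat) : List Int :=
  (List.range (gW grid)).map (fun c => gget grid r c)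
def colLine (grid : List (List Int)) (c : Nat) : List Int :=
  (List.range grid.length).map (fun r => gget grid r c)

theorem length_rowLine (grid : List (List Int)) (r : Nat) :
    (rowLine grid r).length = gW grid := by simp [rowLine]
theorem length_colLine (grid : List (List Int)) (c : Nat) :
    (colLine grid c).length = grid.length := by simp [colLine]

theorem any_take_map_range {n k : Nat} (f : Nat → Int) (hk : k ≤ n) :
    (((List.range n).map f).take k).any (· == 8) = true ↔ ∃ j < k, f j = 8 := by
  rw [← List.map_take, List.take_range]
  have : min k n = k := by omega
  rw [this, List.any_eq_true]
  constructor
  · rintro ⟨x, hx, hx8⟩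
    rw [List.mem_map] at hx
    obtain ⟨j, hj, rfl⟩ := hx
    rw [List.mem_range] at hj
    exact ⟨j, hj, by simpa using hx8⟩
  · rintro ⟨j, hj, h8⟩
    exact ⟨f j, List.mem_map_of_mem (List.mem_range.mpr hj), by simpa using h8⟩

theorem any_drop_map_range {n k : Nat} (f : Nat → Int) :
    (((List.range n).map f).drop k).any (· == 8) = true ↔ ∃ j, k ≤ j ∧ j < n ∧ f j = 8 := by
  have hdr : (List.range n).drop k = List.range' k (n - k) := by
    rw [List.range_eq_range', List.drop_range']
    simp
  rw [← List.map_drop, hdr, List.any_eq_true]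
  constructor
  · rintro ⟨x, hx, hx8⟩
    rw [List.mem_map] at hx
    obtain ⟨j, hj, rfl⟩ := hx
    rw [List.mem_range'_1] at hj
    exact ⟨j, hj.1, by omega, by simpa using hx8⟩
  · rintro ⟨j, hj1, hj2, h8⟩
    exact ⟨f j, List.mem_map_of_mem (List.mem_range'_1.mpr ⟨hj1, by omega⟩), by simpa using h8⟩

theorem between_rowLine (grid : List (List Int)) (r c : Nat) (hc : c < gW grid) :
    (betweenFlags (rowLine grid r)).getD c false = true ↔
      (∃ j ∈ eRow grid r, j < c) ∧ (∃ j ∈ eRow grid r, c < j) := by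
  rw [betweenFlags_getD _ _ (by rw [length_rowLine]; exact hc), Bool.and_eq_true, rowLine]
  rw [any_take_map_range _ (le_of_lt hc), any_drop_map_range]
  constructor
  · rintro ⟨⟨j1, hj1, h81⟩, ⟨j2, hj2a, hj2b, h82⟩⟩
    exact ⟨⟨j1, (mem_eRow grid r j1).mpr ⟨by omega, h81⟩, hj1⟩,
           ⟨j2, (mem_eRow grid r j2).mpr ⟨hj2b, h82⟩, by omega⟩⟩
  · rintro ⟨⟨j1, hj1, hlt1⟩, ⟨j2, hj2, hlt2⟩⟩
    have h1 := (mem_eRow grid r j1).mp hj1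
    have h2 := (mem_eRow grid r j2).mp hj2
    exact ⟨⟨j1, hlt1, h1.2⟩, ⟨j2, by omega, h2.1, h2.2⟩⟩

theorem between_colLine (grid : List (List Int)) (r c : Nat) (hr : r < grid.length) :
    (betweenFlags (colLine grid c)).getD r false = true ↔
      (∃ j ∈ eCol grid c, j < r) ∧ (∃ j ∈ eCol grid c, r < j) := by
  rw [betweenFlags_getD _ _ (by rw [length_colLine]; exact hr), Bool.and_eq_true, colLine]
  rw [any_take_map_range _ (le_of_lt hr), any_drop_map_range]
  constructor
  · rintro ⟨⟨j1, hj1, h81⟩, ⟨j2, hj2a, hj2b, h82⟩⟩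
    exact ⟨⟨j1, (mem_eCol grid j1 c).mpr ⟨by omega, h81⟩, hj1⟩,
           ⟨j2, (mem_eCol grid j2 c).mpr ⟨hj2b, h82⟩, by omega⟩⟩
  · rintro ⟨⟨j1, hj1, hlt1⟩, ⟨j2, hj2, hlt2⟩⟩
    have h1 := (mem_eCol grid j1 c).mp hj1
    have h2 := (mem_eCol grid j2 c).mp hj2
    exact ⟨⟨j1, hlt1, h1.2⟩, ⟨j2, by omega, h2.1, h2.2⟩⟩

def wsRowB (grid : List (List Int)) : List (Nat × Nat) :=
  (List.range grid.length).flatMap (fun r =>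
    ((List.range (gW grid)).filter (fun c => (betweenFlags (rowLine grid r)).getD c false)).map
      (fun c => (r, c)))
def wsColB (grid : List (List Int)) : List (Nat × Nat) :=
  (List.range (gW grid)).flatMap (fun c =>
    ((List.range grid.length).filter (fun r => (betweenFlags (colLine grid c)).getD r false)).map
      (fun r => (r, c)))

theorem transform_alt_eq_writes (grid : List (List Int)) :
    transform_alt grid = (wsColB grid).foldl wstep ((wsRowB grid).foldl wstep grid) := by
  rw [wsColB, wsRowB, List.foldl_flatMap, List.foldl_flatMap]
  show (List.range (gW grid)).foldl
      (fun o c => (List.range grid.length).foldl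
        (fun o2 r => if (betweenFlags (colLine grid c)).getD r false then set2 o2 r c 8 else o2) o)
      ((List.range grid.length).foldl
        (fun o r => (List.range (gW grid)).foldl
          (fun o2 c => if (betweenFlags (rowLine grid r)).getD c false then set2 o2 r c 8 else o2) o)
        (grid.map (fun row => row))) = _
  rw [List.map_id']
  have h1 : (fun (o : List (List Int)) (r : Nat) => (List.range (gW grid)).foldl
        (fun o2 c => if (betweenFlags (rowLine grid r)).getD c false then set2 o2 r c 8 else o2) o) =
      (fun (acc : List (List Int)) (r : Nat) =>
        (((List.range (gW grid)).filter (fun c => (betweenFlags (rowLine grid r)).getD c false)).map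
          (fun c => (r, c))).foldl wstep acc) := by
    funext o r
    rw [PySem.List.foldl_if_eq_foldl_filter, List.foldl_map]
    rfl
  have h2 : (fun (o : List (List Int)) (c : Nat) => (List.range grid.length).foldl
        (fun o2 r => if (betweenFlags (colLine grid c)).getD r false then set2 o2 r c 8 else o2) o) =
      (fun (acc : List (List Int)) (c : Nat) =>
        (((List.range grid.length).filter (fun r => (betweenFlags (colLine grid c)).getD r false)).map
          (fun r => (r, c))).foldl wstep acc) := by
    funext o c
    rw [PySem.List.foldl_if_eq_foldl_filter, List.foldl_map]
    rfl
  rw [h1, h2]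

theorem mem_wsRowB (grid : List (List Int)) (r c : Nat) :
    (r, c) ∈ wsRowB grid ↔
      r < grid.length ∧ c < gW grid ∧
      (∃ j ∈ eRow grid r, j < c) ∧ (∃ j ∈ eRow grid r, c < j) := by
  rw [wsRowB, List.mem_flatMap]
  constructor
  · rintro ⟨r', hr', hmem⟩
    rw [List.mem_range] at hr'
    rw [List.mem_map] at hmem
    obtain ⟨c', hc', he⟩ := hmem
    obtain ⟨rfl, rfl⟩ := Prod.mk.injEq .. ▸ he
    rw [List.mem_filter, List.mem_range] at hc'
    exact ⟨hr', hc'.1, (between_rowLine _ _ _ hc'.1).mp hc'.2⟩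
  · rintro ⟨h1, h2, h3⟩
    refine ⟨r, List.mem_range.mpr h1, ?_⟩
    rw [List.mem_map]
    refine ⟨c, ?_, rfl⟩
    rw [List.mem_filter, List.mem_range]
    exact ⟨h2, (between_rowLine grid r c h2).mpr h3⟩

theorem mem_wsColB (grid : List (List Int)) (r c : Nat) :
    (r, c) ∈ wsColB grid ↔
      c < gW grid ∧ r < grid.length ∧
      (∃ j ∈ eCol grid c, j < r) ∧ (∃ j ∈ eCol grid c, r < j) := by
  rw [wsColB, List.mem_flatMap]
  constructor
  · rintro ⟨c', hc', hmem⟩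
    rw [List.mem_range] at hc'
    rw [List.mem_map] at hmem
    obtain ⟨r', hr', he⟩ := hmem
    obtain ⟨rfl, rfl⟩ := Prod.mk.injEq .. ▸ he
    rw [List.mem_filter, List.mem_range] at hr'
    exact ⟨hc', hr'.1, (between_colLine _ _ _ hr'.1).mp hr'.2⟩
  · rintro ⟨h1, h2, h3⟩
    refine ⟨c, List.mem_range.mpr h1, ?_⟩
    rw [List.mem_map]
    refine ⟨r, ?_, rfl⟩
    rw [List.mem_filter, List.mem_range]
    exact ⟨h2, (between_colLine grid r c h2).mpr h3⟩

theorem hrowB_ws (grid : List (List Int)) (hpre : Pre_transform grid) :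
    ∀ p ∈ wsRowB grid, p.1 < grid.length ∧ p.2 < (grid.getD p.1 []).length := by
  rintro ⟨r, c⟩ hp
  rw [mem_wsRowB] at hp
  have hge := pre_rowlen grid hpre r hp.1
  exact ⟨hp.1, by have := hp.2.1; show c < (grid.getD r []).length; omega⟩

theorem hcolB_ws (grid : List (List Int)) (hpre : Pre_transform grid) :
    ∀ p ∈ wsColB grid, p.1 < grid.length ∧ p.2 < (grid.getD p.1 []).length := by
  rintro ⟨r, c⟩ hp
  rw [mem_wsColB] at hp
  have hge := pre_rowlen grid hpre r hp.2.1
  exact ⟨hp.2.1, by have := hp.1; show c < (grid.getD r []).length; omega⟩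

theorem B_len (grid : List (List Int)) : (transform_alt grid).length = grid.length := by
  rw [transform_alt_eq_writes, writes_len, writes_len]

theorem B_rowlen (grid : List (List Int)) (r : Nat) :
    ((transform_alt grid).getD r []).length = (grid.getD r []).length := by
  rw [transform_alt_eq_writes, writes_rowlen, writes_rowlen]

theorem B_val (grid : List (List Int)) (hpre : Pre_transform grid) (r c : Nat) :
    ((transform_alt grid).getD r []).getD c 0 =
      if (r, c) ∈ wsColB grid ∨ (r, c) ∈ wsRowB grid then 8 else gget grid r c := by
  rw [transform_alt_eq_writes]
  have hcol : ∀ p ∈ wsColB grid,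
      p.1 < ((wsRowB grid).foldl wstep grid).length ∧
      p.2 < (((wsRowB grid).foldl wstep grid).getD p.1 []).length := by
    intro p hp
    rw [writes_len, writes_rowlen]
    exact hcolB_ws grid hpre p hp
  rw [writes_val _ _ hcol, writes_val _ _ (hrowB_ws grid hpre)]
  by_cases h1 : (r, c) ∈ wsColB grid
  · simp [h1]
  · by_cases h2 : (r, c) ∈ wsRowB grid <;> simp [h1, h2, gget]

-- comparing the two write conditions cellwise

theorem rowA_of_rowB (grid : List (List Int)) (r c : Nat) :
    (r, c) ∈ wsRowB grid → (r, c) ∈ wsRow grid := by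
  rw [mem_wsRowB, mem_wsRow]
  rintro ⟨h1, h2, ⟨j1, hj1, hlt1⟩, ⟨j2, hj2, hlt2⟩⟩
  have hs := eRow_pairwise grid r
  have hne : eRow grid r ≠ [] := List.ne_nil_of_mem hj1
  have hh : (eRow grid r).head?.getD 0 ≤ j1 := head_le_of_mem _ hs _ hj1
  have hl : j2 ≤ (eRow grid r).getLast?.getD 0 := le_getLast_of_mem _ hs hne _ hj2
  refine ⟨h1, ?_, by omega, by omega⟩
  rw [two_le_iff_head_lt_getLast _ hs]
  omega

theorem colA_of_colB (grid : List (List Int)) (r c : Nat) :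
    (r, c) ∈ wsColB grid → (r, c) ∈ wsCol grid := by
  rw [mem_wsColB, mem_wsCol]
  rintro ⟨h1, h2, ⟨j1, hj1, hlt1⟩, ⟨j2, hj2, hlt2⟩⟩
  have hs := eCol_pairwise grid c
  have hne : eCol grid c ≠ [] := List.ne_nil_of_mem hj1
  have hh : (eCol grid c).head?.getD 0 ≤ j1 := head_le_of_mem _ hs _ hj1
  have hl : j2 ≤ (eCol grid c).getLast?.getD 0 := le_getLast_of_mem _ hs hne _ hj2
  refine ⟨h1, ?_, by omega, by omega⟩
  rw [two_le_iff_head_lt_getLast _ hs]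
  omega

theorem gget8_of_rowA_not_rowB (grid : List (List Int)) (r c : Nat)
    (hA : (r, c) ∈ wsRow grid) (hB : (r, c) ∉ wsRowB grid) : gget grid r c = 8 := by
  rw [mem_wsRow] at hA
  obtain ⟨h1, h2, h3, h4⟩ := hA
  have hs := eRow_pairwise grid r
  have hne : eRow grid r ≠ [] := two_ne_nil _ h2
  have hlastmem := getLast?_getD_mem _ hne
  have hheadmem := head?_getD_mem _ hne
  have hlastw := ((mem_eRow grid r _).mp hlastmem).1
  have hcw : c < gW grid := by omega
  rw [mem_wsRowB] at hB
  push Not at hB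
  have := hB h1 hcw
  by_cases hex : ∃ j ∈ eRow grid r, j < c
  · -- then no element strictly greater than c: getLast ≤ c, so c = getLast ∈ eRow
    have hle := this hex _ hlastmem
    have heq : (eRow grid r).getLast?.getD 0 = c := by omega
    rw [← heq]
    exact ((mem_eRow grid r _).mp hlastmem).2
  · -- no element strictly less than c: c ≤ head, so c = head ∈ eRow
    push Not at hex
    have hge := hex _ hheadmem
    have heq : (eRow grid r).head?.getD 0 = c := by omega
    rw [← heq]
    exact ((mem_eRow grid r _).mp hheadmem).2

theorem gget8_of_colA_not_colB (grid : List (List Int)) (r c : Nat)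
    (hA : (r, c) ∈ wsCol grid) (hB : (r, c) ∉ wsColB grid) : gget grid r c = 8 := by
  rw [mem_wsCol] at hA
  obtain ⟨h1, h2, h3, h4⟩ := hA
  have hs := eCol_pairwise grid c
  have hne : eCol grid c ≠ [] := two_ne_nil _ h2
  have hlastmem := getLast?_getD_mem _ hne
  have hheadmem := head?_getD_mem _ hne
  have hlasth := ((mem_eCol grid _ c).mp hlastmem).1
  have hrh : r < grid.length := by omega
  rw [mem_wsColB] at hB
  push Not at hB
  have := hB h1 hrh
  by_cases hex : ∃ j ∈ eCol grid c, j < r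
  · have hle := this hex _ hlastmem
    have heq : (eCol grid c).getLast?.getD 0 = r := by omega
    rw [← heq]
    exact ((mem_eCol grid _ c).mp hlastmem).2
  · push Not at hex
    have hge := hex _ hheadmem
    have heq : (eCol grid c).head?.getD 0 = r := by omega
    rw [← heq]
    exact ((mem_eCol grid _ c).mp hheadmem).2

theorem A_eq_B (grid : List (List Int)) (hpre : Pre_transform grid) :
    transform grid = transform_alt grid := by
  apply List.ext_getElem (by rw [A_len, B_len])
  intro r h1 h2
  have hrows : (transform grid).getD r [] = (transform_alt grid).getD r [] := by
    apply List.ext_getElem (by rw [A_rowlen, B_rowlen])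
    intro c hc1 hc2
    have hcell : ((transform grid).getD r []).getD c 0 =
        ((transform_alt grid).getD r []).getD c 0 := by
      rw [A_val grid hpre r c, B_val grid hpre r c]
      by_cases hBm : (r, c) ∈ wsColB grid ∨ (r, c) ∈ wsRowB grid
      · rw [if_pos ?_, if_pos hBm]
        rcases hBm with h | h
        · exact Or.inl (colA_of_colB grid r c h)
        · exact Or.inr (rowA_of_rowB grid r c h)
      · rw [if_neg hBm]
        by_cases hAm : (r, c) ∈ wsCol grid ∨ (r, c) ∈ wsRow grid
        · rw [if_pos hAm]
          push Not at hBm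
          rcases hAm with h | h
          · exact (gget8_of_colA_not_colB grid r c h hBm.1).symm
          · exact (gget8_of_rowA_not_rowB grid r c h hBm.2).symm
        · rw [if_neg hAm]
    calc ((transform grid).getD r [])[c] = ((transform grid).getD r []).getD c 0 :=
          (List.getD_eq_getElem _ _ hc1).symm
      _ = ((transform_alt grid).getD r []).getD c 0 := hcell
      _ = ((transform_alt grid).getD r [])[c] := List.getD_eq_getElem _ _ hc2
  calc (transform grid)[r] = (transform grid).getD r [] := (List.getD_eq_getElem _ _ h1).symm
    _ = (transform_alt grid).getD r [] := hrows
    _ = (transform_alt grid)[r] := List.getD_eq_getElem _ _ h2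

-- ===== VERDICT (by name: the statement is the Claim_ definition above) =====
theorem transform_spec : Claim_equal_transform := by
  intro grid _ hpre
  unfold Spec_transform
  exact A_eq_B grid hpre
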